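-- pv_equiv track=rewrite | github.com/tru/presentations | eurollvm26/release-update/scripts/gen_llvm_breakdown.py | count_backends
-- ===== SOURCE A (Python) =====
-- import collections
--
-- BACKEND_IGNORE = {"TargetLoweringObjectFile.cpp", "CMakeLists.txt"}
--
-- def count_backends(merged, files) -> collections.Counter:
--     """Count PRs per backend. A PR touching multiple backends counts for each."""
--     ctr: collections.Counter = collections.Counter()
--     for pr in merged:
--         backends: set[str] = set()
--         for path in files.get(pr["number"], []):
--             parts = path.split("/")
--             # llvm/lib/Target/<Backend>/...
--             if (len(parts) >= 4
--                     and parts[0] == "llvm"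
--                     and parts[1] == "lib"
--                     and parts[2] == "Target"
--                     and parts[3] not in BACKEND_IGNORE):
--                 backends.add(parts[3])
--         for b in backends:
--             ctr[b] += 1
--     return ctr
-- ===== SOURCE B (Python) =====
-- import collections
--
-- BACKEND_IGNORE = {"TargetLoweringObjectFile.cpp", "CMakeLists.txt"}
--
-- def _backend_of(path):
--     parts = path.split("/")
--     # llvm/lib/Target/<Backend>/...
--     if (len(parts) >= 4
--             and parts[0] == "llvm"
--             and parts[1] == "lib"
--             and parts[2] == "Target"
--             and parts[3] not in BACKEND_IGNORE):
--         return parts[3]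
--     return None
--
-- def count_backends(merged, files) -> collections.Counter:
--     """Count PRs per backend via an inverted index backend -> set of PR indices."""
--     touched = {}  # backend -> set of indices of PRs touching it
--     for idx, pr in enumerate(merged):
--         for path in files.get(pr["number"], []):
--             b = _backend_of(path)
--             if b is not None:
--                 touched.setdefault(b, set()).add(idx)
--     return collections.Counter({b: len(prs) for b, prs in touched.items()})
-- ===== Notes on version B (the rewrite author's own statement) =====
-- stated objective: alternative
-- what changed: Replaces A's per-PR backend set plus incremental Counter updates by an inverted index mapping backend -> set of PR indices, built in one pass over enumerate(merged), with the counts read off as set sizes at the end.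
import Mathlib
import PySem

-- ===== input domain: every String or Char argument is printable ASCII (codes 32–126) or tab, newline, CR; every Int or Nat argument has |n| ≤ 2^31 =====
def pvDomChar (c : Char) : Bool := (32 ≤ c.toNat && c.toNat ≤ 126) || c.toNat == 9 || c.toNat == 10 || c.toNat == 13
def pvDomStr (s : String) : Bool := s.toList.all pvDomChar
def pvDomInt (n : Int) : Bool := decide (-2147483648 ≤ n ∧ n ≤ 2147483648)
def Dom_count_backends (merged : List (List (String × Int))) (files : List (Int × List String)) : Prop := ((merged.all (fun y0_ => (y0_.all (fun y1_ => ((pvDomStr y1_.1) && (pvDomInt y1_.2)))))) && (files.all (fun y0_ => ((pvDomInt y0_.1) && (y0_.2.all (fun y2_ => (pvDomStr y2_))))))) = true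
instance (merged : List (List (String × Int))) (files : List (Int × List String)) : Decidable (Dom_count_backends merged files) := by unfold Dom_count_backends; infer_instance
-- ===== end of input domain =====

-- B replaces A's per-PR backend set + incremental Counter by an inverted index backend -> set of PR indices (alternative decomposition, same cost).


-- ===== PORT A =====
-- A: per PR, collect the set of backends its files touch, then bump a Counter entry per backend.
def count_backends (merged : List (List (String × Int))) (files : List (Int × List String)) : List (String × Int) :=
  (merged.foldl (fun (ctr : PySem.Dict String Int) pr =>
      let backends : PySem.Set String :=
        (PySem.Dict.getD (PySem.Dict.mk files) ((PySem.Dict.get? (PySem.Dict.mk pr) "number").getD 0) []).foldl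
          (fun s path =>
            if 4 ≤ ((PySem.Str.split? path "/").getD []).length ∧
                ((PySem.Str.split? path "/").getD []).getD 0 "" = "llvm" ∧
                ((PySem.Str.split? path "/").getD []).getD 1 "" = "lib" ∧
                ((PySem.Str.split? path "/").getD []).getD 2 "" = "Target" ∧
                ((PySem.Str.split? path "/").getD []).getD 3 "" ∉ ["TargetLoweringObjectFile.cpp", "CMakeLists.txt"]
            then PySem.Set.add s (((PySem.Str.split? path "/").getD []).getD 3 "") else s)
          PySem.Set.empty
      backends.foldl (fun c b => PySem.Dict.modify c b 0 (· + 1)) ctr)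
    PySem.Dict.empty).items

-- ===== PORT B =====
-- path.split("/") is a list; a path names a backend iff it is llvm/lib/Target/<Backend>/... with <Backend> not ignored
def pvBackendOf (path : String) : Option String :=
  if 4 ≤ ((PySem.Str.split? path "/").getD []).length ∧
      ((PySem.Str.split? path "/").getD []).getD 0 "" = "llvm" ∧
      ((PySem.Str.split? path "/").getD []).getD 1 "" = "lib" ∧
      ((PySem.Str.split? path "/").getD []).getD 2 "" = "Target" ∧
      ((PySem.Str.split? path "/").getD []).getD 3 "" ∉ ["TargetLoweringObjectFile.cpp", "CMakeLists.txt"]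
  then some (((PySem.Str.split? path "/").getD []).getD 3 "") else none

def count_backends_alt (merged : List (List (String × Int))) (files : List (Int × List String)) : List (String × Int) :=
  let touched : PySem.Dict String (PySem.Set Int) :=
    (PySem.List.enumerate merged 0).foldl (fun m ip =>
        (PySem.Dict.getD (PySem.Dict.mk files) ((PySem.Dict.get? (PySem.Dict.mk ip.2) "number").getD 0) []).foldl
          (fun m path =>
            match pvBackendOf path with
            | some b => PySem.Dict.modify m b PySem.Set.empty (fun s => PySem.Set.add s ip.1)
            | none => m)
          m)
      PySem.Dict.empty
  touched.items.map (fun p => (p.1, PySem.Set.len p.2))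

-- ===== PRECONDITION & SPEC =====
-- Pre_ excludes exactly the inputs where A raises KeyError: some PR dict lacking the key "number".
def Pre_count_backends (merged : List (List (String × Int))) (files : List (Int × List String)) : Prop :=
  ∀ pr ∈ merged, PySem.Dict.contains (PySem.Dict.mk pr) "number" = true
instance (merged : List (List (String × Int))) (files : List (Int × List String)) : Decidable (Pre_count_backends merged files) := by unfold Pre_count_backends; infer_instance
def pvWitness_count_backends : (List (List (String × Int))) × (List (Int × List String)) :=
  ([[("number", 1)]], [(1, ["llvm/lib/Target/X86/X86ISelLowering.cpp"])])

def Spec_count_backends (merged : List (List (String × Int))) (files : List (Int × List String)) (out : List (String × Int)) : Prop := out = count_backends_alt merged files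
instance (merged : List (List (String × Int))) (files : List (Int × List String)) (out : List (String × Int)) : Decidable (Spec_count_backends merged files out) := by unfold Spec_count_backends; infer_instance

-- ===== CLAIM (what is proved, stated in full; the proofs are below) =====
def Claim_equal_count_backends : Prop := ∀ (merged : List (List (String × Int))) (files : List (Int × List String)), Dom_count_backends merged files → Pre_count_backends merged files → Spec_count_backends merged files (count_backends merged files)

-- ===== LEMMAS AND PROOFS =====

-- the counts dictionary induced by the inverted index: each backend with the size of its PR-index set
def pvDictLen (m : PySem.Dict String (PySem.Set Int)) : PySem.Dict String Int :=
  PySem.Dict.mk (m.items.map (fun p => (p.1, PySem.Set.len p.2)))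

-- A's inner loop computes set(filterMap pvBackendOf paths)
theorem pv_innerA (paths : List String) :
    paths.foldl
      (fun s path =>
        if 4 ≤ ((PySem.Str.split? path "/").getD []).length ∧
            ((PySem.Str.split? path "/").getD []).getD 0 "" = "llvm" ∧
            ((PySem.Str.split? path "/").getD []).getD 1 "" = "lib" ∧
            ((PySem.Str.split? path "/").getD []).getD 2 "" = "Target" ∧
            ((PySem.Str.split? path "/").getD []).getD 3 "" ∉ ["TargetLoweringObjectFile.cpp", "CMakeLists.txt"]
        then PySem.Set.add s (((PySem.Str.split? path "/").getD []).getD 3 "") else s)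
      PySem.Set.empty
    = PySem.Set.ofList (paths.filterMap pvBackendOf) := by
  rw [PySem.Set.ofList_eq_foldl, List.foldl_filterMap]
  congr 1
  funext s path
  by_cases hC : 4 ≤ ((PySem.Str.split? path "/").getD []).length ∧
      ((PySem.Str.split? path "/").getD []).getD 0 "" = "llvm" ∧
      ((PySem.Str.split? path "/").getD []).getD 1 "" = "lib" ∧
      ((PySem.Str.split? path "/").getD []).getD 2 "" = "Target" ∧
      ((PySem.Str.split? path "/").getD []).getD 3 "" ∉ ["TargetLoweringObjectFile.cpp", "CMakeLists.txt"]
  · rw [if_pos hC, pvBackendOf, if_pos hC]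
  · rw [if_neg hC, pvBackendOf, if_neg hC]

theorem pv_add_mem {α : Type} [BEq α] [LawfulBEq α] (s : PySem.Set α) (x : α) (h : x ∈ s) :
    PySem.Set.add s x = s := by simp [PySem.Set.add, h]

theorem pv_add_not_mem {α : Type} [BEq α] [LawfulBEq α] (s : PySem.Set α) (x : α) (h : x ∉ s) :
    PySem.Set.add s x = s ++ [x] := by simp [PySem.Set.add, h]

theorem pv_mem_foldl_add_left {α : Type} [BEq α] [LawfulBEq α] (t : List α) (s : PySem.Set α) (x : α)
    (h : x ∈ s) : x ∈ List.foldl PySem.Set.add s t := by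
  induction t generalizing s with
  | nil => exact h
  | cons y t ih => exact ih _ ((PySem.Set.mem_add s y x).2 (Or.inl h))

theorem pv_mem_foldl_add_right {α : Type} [BEq α] [LawfulBEq α] (t : List α) (s : PySem.Set α) (x : α)
    (h : x ∈ t) : x ∈ List.foldl PySem.Set.add s t := by
  induction t generalizing s with
  | nil => cases h
  | cons y t ih =>
    rcases List.mem_cons.mp h with rfl | h'
    · exact pv_mem_foldl_add_left t _ x ((PySem.Set.mem_add s x x).2 (Or.inr rfl))
    · exact ih _ h'

theorem pv_foldl_add_assoc {α : Type} [BEq α] [LawfulBEq α] (L : List α) (t s : PySem.Set α) :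
    List.foldl PySem.Set.add s (List.foldl PySem.Set.add t L)
      = List.foldl PySem.Set.add (List.foldl PySem.Set.add s t) L := by
  induction L generalizing t with
  | nil => rfl
  | cons x L ih =>
    rw [List.foldl_cons, List.foldl_cons, ih]
    congr 1
    by_cases h : x ∈ t
    · rw [pv_add_mem t x h, pv_add_mem _ x (pv_mem_foldl_add_right t s x h)]
    · rw [pv_add_not_mem t x h, List.foldl_append, List.foldl_cons, List.foldl_nil]

theorem pv_update_ofList (s : PySem.Set String) (L : List String) :
    PySem.Set.update s (PySem.Set.ofList L) = PySem.Set.update s L := by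
  show List.foldl PySem.Set.add s (PySem.Set.ofList L) = List.foldl PySem.Set.add s L
  rw [PySem.Set.ofList_eq_foldl, pv_foldl_add_assoc]
  rfl

theorem pv_getD_addIdx (L : List String) (idx : Int) (m : PySem.Dict String (PySem.Set Int)) (k : String) :
    (List.foldl (fun m b => PySem.Dict.modify m b PySem.Set.empty (fun s => PySem.Set.add s idx)) m L).getD k PySem.Set.empty
      = if k ∈ L then PySem.Set.add (m.getD k PySem.Set.empty) idx
        else m.getD k PySem.Set.empty := by
  induction L generalizing m with
  | nil => simp
  | cons b L ih =>
    rw [List.foldl_cons, ih, PySem.Dict.getD_modify]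
    by_cases hb : k = b
    · subst hb
      by_cases hk : k ∈ L
      · simp only [if_pos hk, List.mem_cons, true_or, if_true]
        exact pv_add_mem _ idx ((PySem.Set.mem_add _ idx idx).2 (Or.inr rfl))
      · simp [hk]
    · by_cases hk : k ∈ L <;> simp [hb, hk]

-- B's inner loop over one PR's paths, written as a fold over the matching backends
theorem pv_innerB (paths : List String) (idx : Int) (m : PySem.Dict String (PySem.Set Int)) :
    paths.foldl
      (fun m path =>
        match pvBackendOf path with
        | some b => PySem.Dict.modify m b PySem.Set.empty (fun s => PySem.Set.add s idx)
        | none => m)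
      m
    = (paths.filterMap pvBackendOf).foldl
        (fun m b => PySem.Dict.modify m b PySem.Set.empty (fun s => PySem.Set.add s idx)) m := by
  induction paths generalizing m with
  | nil => rfl
  | cons p paths ih =>
    rw [List.foldl_cons, List.filterMap_cons]
    cases h : pvBackendOf p <;> simp only [ih, List.foldl_cons]

theorem pv_getD_pvDictLen (m : PySem.Dict String (PySem.Set Int)) (k : String) :
    (pvDictLen m).getD k 0 = PySem.Set.len (m.getD k PySem.Set.empty) := by
  obtain ⟨l⟩ := m
  induction l with
  | nil => rfl
  | cons p t ih =>
    obtain ⟨a, v⟩ := p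
    show (PySem.Dict.mk ((a, PySem.Set.len v) :: t.map _)).getD k 0 = _
    rw [PySem.Dict.getD_eq_get?_getD, PySem.Dict.getD_eq_get?_getD,
      PySem.Dict.get?_mk_cons, PySem.Dict.get?_mk_cons]
    by_cases h : a = k
    · simp [h]
    · simp only [beq_iff_eq, h, if_false]
      rw [← PySem.Dict.getD_eq_get?_getD, ← PySem.Dict.getD_eq_get?_getD]
      exact ih

theorem pv_keys_pvDictLen (m : PySem.Dict String (PySem.Set Int)) :
    (pvDictLen m).keys = m.keys := by
  simp only [pvDictLen, PySem.Dict.keys, List.map_map]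
  rfl

theorem pv_len_append_one (s : PySem.Set Int) (x : Int) :
    PySem.Set.len (s ++ [x]) = PySem.Set.len s + 1 := by
  simp [PySem.Set.len]

-- one PR step: bumping the counter for each backend of the set equals adding one fresh index into the inverted sets
theorem pv_step (L : List String) (idx : Int) (m : PySem.Dict String (PySem.Set Int))
    (hnd : m.keys.Nodup) (hfresh : ∀ k, idx ∉ m.getD k PySem.Set.empty) :
    List.foldl (fun c b => PySem.Dict.modify c b 0 (· + 1)) (pvDictLen m) (PySem.Set.ofList L)
      = pvDictLen (List.foldl (fun m b => PySem.Dict.modify m b PySem.Set.empty (fun s => PySem.Set.add s idx)) m L) := by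
  have hndL : (List.foldl (fun c b => PySem.Dict.modify c b 0 (· + 1)) (pvDictLen m) (PySem.Set.ofList L)).keys.Nodup :=
    PySem.Dict.nodup_keys_foldl_modify_key (PySem.Set.ofList L) (fun b => b) 0 (fun _ _ => (· + 1)) (pvDictLen m)
      (by rw [pv_keys_pvDictLen]; exact hnd)
  have hndR : (List.foldl (fun m b => PySem.Dict.modify m b PySem.Set.empty (fun s => PySem.Set.add s idx)) m L).keys.Nodup :=
    PySem.Dict.nodup_keys_foldl_modify_key L (fun b => b) PySem.Set.empty (fun _ _ s => PySem.Set.add s idx) m hnd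
  have hkL : (List.foldl (fun c b => PySem.Dict.modify c b 0 (· + 1)) (pvDictLen m) (PySem.Set.ofList L)).keys
      = PySem.Set.update (pvDictLen m).keys (PySem.Set.ofList L) :=
    PySem.Dict.keys_foldl_modify (PySem.Set.ofList L) 0 (fun _ _ => (· + 1)) (pvDictLen m)
  have hkR : (List.foldl (fun m b => PySem.Dict.modify m b PySem.Set.empty (fun s => PySem.Set.add s idx)) m L).keys
      = PySem.Set.update m.keys L :=
    PySem.Dict.keys_foldl_modify L PySem.Set.empty (fun _ _ s => PySem.Set.add s idx) m
  have hkeys : (List.foldl (fun c b => PySem.Dict.modify c b 0 (· + 1)) (pvDictLen m) (PySem.Set.ofList L)).keys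
      = (List.foldl (fun m b => PySem.Dict.modify m b PySem.Set.empty (fun s => PySem.Set.add s idx)) m L).keys := by
    rw [hkL, hkR, pv_keys_pvDictLen, pv_update_ofList]
  have hgetD : ∀ k, (List.foldl (fun c b => PySem.Dict.modify c b 0 (· + 1)) (pvDictLen m) (PySem.Set.ofList L)).getD k 0
      = (pvDictLen (List.foldl (fun m b => PySem.Dict.modify m b PySem.Set.empty (fun s => PySem.Set.add s idx)) m L)).getD k 0 := by
    intro k
    rw [PySem.Dict.getD_foldl_modify_add_one, pv_getD_pvDictLen, pv_getD_pvDictLen, pv_getD_addIdx]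
    by_cases hk : k ∈ L
    · rw [if_pos hk, pv_add_not_mem _ idx (hfresh k), pv_len_append_one,
        List.count_eq_one_of_mem (PySem.Set.nodup_ofList L) ((PySem.Set.mem_ofList L k).2 hk)]
      push_cast; ring
    · rw [if_neg hk, List.count_eq_zero_of_not_mem (fun hc => hk ((PySem.Set.mem_ofList L k).1 hc))]
      push_cast; ring
  apply PySem.Dict.ext
  rw [PySem.Dict.items_eq_map_keys _ hndL 0,
    PySem.Dict.items_eq_map_keys _ (by rw [pv_keys_pvDictLen]; exact hndR) 0,
    pv_keys_pvDictLen, ← hkeys]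
  exact List.map_congr_left (fun k _ => by rw [hgetD k])

-- outer loop invariant: A's counter is the size-map of B's inverted index, all stored indices below the next one
theorem pv_outer (files : List (Int × List String)) (merged : List (List (String × Int)))
    (n : Int) (m : PySem.Dict String (PySem.Set Int))
    (hnd : m.keys.Nodup) (hbound : ∀ k i, i ∈ m.getD k PySem.Set.empty → i < n) :
    merged.foldl (fun (ctr : PySem.Dict String Int) pr =>
        let backends : PySem.Set String :=
          (PySem.Dict.getD (PySem.Dict.mk files) ((PySem.Dict.get? (PySem.Dict.mk pr) "number").getD 0) []).foldl
            (fun s path =>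
              if 4 ≤ ((PySem.Str.split? path "/").getD []).length ∧
                  ((PySem.Str.split? path "/").getD []).getD 0 "" = "llvm" ∧
                  ((PySem.Str.split? path "/").getD []).getD 1 "" = "lib" ∧
                  ((PySem.Str.split? path "/").getD []).getD 2 "" = "Target" ∧
                  ((PySem.Str.split? path "/").getD []).getD 3 "" ∉ ["TargetLoweringObjectFile.cpp", "CMakeLists.txt"]
              then PySem.Set.add s (((PySem.Str.split? path "/").getD []).getD 3 "") else s)
            PySem.Set.empty
        backends.foldl (fun c b => PySem.Dict.modify c b 0 (· + 1)) ctr)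
      (pvDictLen m)
    = pvDictLen ((PySem.List.enumerate merged n).foldl (fun m ip =>
        (PySem.Dict.getD (PySem.Dict.mk files) ((PySem.Dict.get? (PySem.Dict.mk ip.2) "number").getD 0) []).foldl
          (fun m path =>
            match pvBackendOf path with
            | some b => PySem.Dict.modify m b PySem.Set.empty (fun s => PySem.Set.add s ip.1)
            | none => m)
          m) m) := by
  induction merged generalizing n m with
  | nil => rfl
  | cons pr rest ih =>
    rw [PySem.List.enumerate_cons, List.foldl_cons, List.foldl_cons]
    dsimp only
    rw [pv_innerA, pv_innerB]
    rw [pv_step _ n m hnd (fun k h => absurd (hbound k n h) (lt_irrefl n))]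
    apply ih
    · exact PySem.Dict.nodup_keys_foldl_modify_key _ (fun b => b) PySem.Set.empty
        (fun _ _ s => PySem.Set.add s n) m hnd
    · intro k i hi
      rw [pv_getD_addIdx] at hi
      by_cases hk : k ∈ List.filterMap pvBackendOf
          (PySem.Dict.getD (PySem.Dict.mk files) ((PySem.Dict.get? (PySem.Dict.mk pr) "number").getD 0) [])
      · rw [if_pos hk] at hi
        rcases (PySem.Set.mem_add _ n i).1 hi with h | rfl
        · exact lt_trans (hbound k i h) (by omega)
        · omega
      · rw [if_neg hk] at hi
        exact lt_trans (hbound k i hi) (by omega)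

-- ===== VERDICT (by name: the statement is the Claim_ definition above) =====
theorem count_backends_spec : Claim_equal_count_backends := by
  intro merged files _ _
  show count_backends merged files = count_backends_alt merged files
  exact congrArg PySem.Dict.items
    (pv_outer files merged 0 PySem.Dict.empty
      (by rw [PySem.Dict.keys_empty]; exact List.nodup_nil)
      (by intro k i hi; rw [PySem.Dict.getD_empty] at hi; cases hi))
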